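-- pv_equiv track=rewrite | github.com/ahaque2/News_Stance_Detection | approach_1.py | get_hedge_word_counts
-- ===== SOURCE A (Python) =====
-- def get_hedge_word_counts(sent_list, hedge_words):
--     hedge_word_counts = []
--     for sent in sent_list:
--         count = 0
--         for word in hedge_words:
--             if word in sent:
--                 count+=1
--         hedge_word_counts.append(count)
--     return hedge_word_counts
-- ===== SOURCE B (Python) =====
-- def get_hedge_word_counts(sent_list, hedge_words):
--     # Transposed traversal: one running counter per sentence, one pass per hedge word.
--     counts = [0] * len(sent_list)
--     for word in hedge_words:
--         counts = [c + 1 if word in sent else c for c, sent in zip(counts, sent_list)]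
--     return counts
-- ===== Notes on version B (the rewrite author's own statement) =====
-- stated objective: alternative
-- what changed: Loop order is transposed: instead of counting hedge words sentence-by-sentence with an inner scan over the word list, B keeps a vector of per-sentence counters and updates all of them in one zip pass per hedge word.
import Mathlib
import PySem

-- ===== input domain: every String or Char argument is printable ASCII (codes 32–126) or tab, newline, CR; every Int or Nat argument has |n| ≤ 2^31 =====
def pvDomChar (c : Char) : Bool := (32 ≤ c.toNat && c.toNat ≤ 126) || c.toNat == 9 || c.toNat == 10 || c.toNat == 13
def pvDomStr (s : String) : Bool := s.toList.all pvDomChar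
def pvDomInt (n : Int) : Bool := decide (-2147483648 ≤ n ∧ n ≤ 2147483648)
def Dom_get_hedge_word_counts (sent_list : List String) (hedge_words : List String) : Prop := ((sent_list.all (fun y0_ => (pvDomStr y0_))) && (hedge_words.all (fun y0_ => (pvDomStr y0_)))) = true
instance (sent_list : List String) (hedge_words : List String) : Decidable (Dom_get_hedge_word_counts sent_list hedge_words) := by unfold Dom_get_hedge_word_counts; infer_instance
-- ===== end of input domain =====

-- B transposes A's loops: it keeps one running counter per sentence and updates all of
-- them in a single zip pass per hedge word (alternative decomposition, same cost).


-- ===== PORT A =====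
-- for sent in sent_list: count = 0; for word in hedge_words: if word in sent: count += 1; append
def get_hedge_word_counts (sent_list : List String) (hedge_words : List String) : List Int :=
  sent_list.foldl
    (fun hedge_word_counts sent =>
      hedge_word_counts ++
        [hedge_words.foldl (fun count word => if PySem.Str.isIn word sent then count + 1 else count) 0])
    []

-- ===== PORT B =====
-- counts = [0]*len(sent_list); for word: counts = [c+1 if word in sent else c for c,sent in zip(counts, sent_list)]
def get_hedge_word_counts_alt (sent_list : List String) (hedge_words : List String) : List Int :=
  hedge_words.foldl
    (fun counts word =>
      (counts.zip sent_list).map (fun p => if PySem.Str.isIn word p.2 then p.1 + 1 else p.1))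
    (List.replicate sent_list.length 0)

-- ===== PRECONDITION & SPEC =====
def Spec_get_hedge_word_counts (sent_list : List String) (hedge_words : List String) (out : List Int) : Prop := out = get_hedge_word_counts_alt sent_list hedge_words
instance (sent_list : List String) (hedge_words : List String) (out : List Int) : Decidable (Spec_get_hedge_word_counts sent_list hedge_words out) := by unfold Spec_get_hedge_word_counts; infer_instance

-- ===== CLAIM (what is proved, stated in full; the proofs are below) =====
def Claim_equal_get_hedge_word_counts : Prop := ∀ (sent_list : List String) (hedge_words : List String), Dom_get_hedge_word_counts sent_list hedge_words → Spec_get_hedge_word_counts sent_list hedge_words (get_hedge_word_counts sent_list hedge_words)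

-- ===== LEMMAS AND PROOFS =====

-- zipping the mapped zip back with the same right list fuses into one map over the zip
theorem pv_zip_map_zip {β γ δ : Type} (f : γ × β → δ) (g : γ × β → γ) :
    ∀ (sl : List β) (cs : List γ),
      (((cs.zip sl).map g).zip sl).map f = (cs.zip sl).map (fun p => f (g p, p.2)) := by
  intro sl
  induction sl with
  | nil => intro cs; simp
  | cons s sl ih =>
      intro cs
      cases cs with
      | nil => simp
      | cons c cs =>
          simp only [List.zip_cons_cons, List.map_cons]
          rw [ih cs]

-- the B fold computes, pointwise over zip, start value + number of matching hedge words
theorem pv_alt_fold (sl : List String) :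
    ∀ (hw : List String) (cs : List Int), cs.length = sl.length →
      hw.foldl
        (fun counts word =>
          (counts.zip sl).map (fun p => if PySem.Str.isIn word p.2 then p.1 + 1 else p.1))
        cs
      = (cs.zip sl).map (fun p => p.1 + (hw.countP (fun w => PySem.Str.isIn w p.2) : Int)) := by
  intro hw
  induction hw with
  | nil =>
      intro cs h
      simp only [List.foldl_nil, List.countP_nil, Nat.cast_zero, add_zero]
      exact (List.map_fst_zip (le_of_eq h)).symm
  | cons w hw ih =>
      intro cs h
      rw [List.foldl_cons,
        ih _ (by rw [List.length_map, List.length_zip, h, Nat.min_self]),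
        pv_zip_map_zip]
      apply List.map_congr_left
      intro p _
      rw [List.countP_cons]
      push_cast
      split_ifs <;> ring

-- replicate-zip unfolds to a map
theorem pv_zip_replicate {α : Type} (z : Int) :
    ∀ (sl : List α), ((List.replicate sl.length z).zip sl) = sl.map (fun s => (z, s))
  | [] => by simp
  | s :: sl => by simp [List.replicate_succ, pv_zip_replicate z sl]

-- ===== VERDICT (by name: the statement is the Claim_ definition above) =====
theorem get_hedge_word_counts_spec : Claim_equal_get_hedge_word_counts := by
  intro sl hw _
  unfold Spec_get_hedge_word_counts get_hedge_word_counts get_hedge_word_counts_alt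
  rw [pv_alt_fold sl hw _ (List.length_replicate), pv_zip_replicate,
    PySem.List.foldl_append_singleton_eq_map, List.map_map, List.nil_append]
  apply List.map_congr_left
  intro s _
  rw [Function.comp_apply, PySem.List.foldl_if_add_one]
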